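-- pv_equiv track=rewrite | github.com/heYeCheng/stock_logic | old/src/sector_logic/services/buffett_filter.py | _determine_final_result
-- ===== SOURCE A (Python) =====
-- from typing import Any, Dict, Optional
--
-- def _determine_final_result(dimension_results: Dict[str, Dict]) -> str:
--     """
--     Determine final result based on dimension results.
--
--     Rules:
--     - fail: any dimension is "fail"
--     - pass: all dimensions at least "pass_with_concerns", and at least 2 are "pass"
--     - pass_with_concerns: all at least "pass_with_concerns", but 0-1 "pass"
--     """
--     results = [d["result"] for d in dimension_results.values()]
--
--     # Any fail → fail
--     if "fail" in results:
--         return "fail"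
--
--     pass_count = sum(1 for r in results if r == "pass")
--
--     if pass_count >= 2:
--         return "pass"
--     else:
--         return "pass_with_concerns"
-- ===== SOURCE B (Python) =====
-- def _determine_final_result(dimension_results):
--     """Divide and conquer: recursively merge (has_fail, pass_count) summaries of halves."""
--
--     def summarize(vals):
--         if not vals:
--             return (False, 0)
--         if len(vals) == 1:
--             r = vals[0]["result"]
--             return (r == "fail", 1 if r == "pass" else 0)
--         mid = len(vals) // 2
--         f1, c1 = summarize(vals[:mid])
--         f2, c2 = summarize(vals[mid:])
--         return (f1 or f2, c1 + c2)
--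
--     has_fail, pass_count = summarize(list(dimension_results.values()))
--     if has_fail:
--         return "fail"
--     return "pass" if pass_count >= 2 else "pass_with_concerns"
-- ===== Notes on version B (the rewrite author's own statement) =====
-- stated objective: alternative
-- what changed: Replaced A's list build plus separate membership scan and count with a divide-and-conquer recursion that splits the values in halves and merges (has_fail, pass_count) summaries, deciding the verdict from the merged summary.
import Mathlib
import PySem

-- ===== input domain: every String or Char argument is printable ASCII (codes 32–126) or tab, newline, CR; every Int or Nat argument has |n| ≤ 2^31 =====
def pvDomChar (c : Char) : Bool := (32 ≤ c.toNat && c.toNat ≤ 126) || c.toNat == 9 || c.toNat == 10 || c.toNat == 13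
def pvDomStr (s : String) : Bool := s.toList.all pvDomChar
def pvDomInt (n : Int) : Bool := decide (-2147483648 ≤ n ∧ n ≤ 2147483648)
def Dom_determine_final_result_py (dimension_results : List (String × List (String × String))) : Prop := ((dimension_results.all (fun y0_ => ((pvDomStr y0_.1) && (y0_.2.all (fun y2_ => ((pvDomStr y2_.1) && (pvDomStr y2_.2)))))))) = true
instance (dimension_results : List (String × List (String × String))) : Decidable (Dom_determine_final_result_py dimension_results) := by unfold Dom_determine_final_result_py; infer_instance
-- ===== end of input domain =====

-- B replaces A's list build + membership scan + count with a divide-and-conquer merge of (has_fail, pass_count) summaries; return value only.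

-- ===== PORT A =====
-- d["result"] of an inner dict: first-match lookup; Pre_ guarantees the key is present, so getD "" is never used inside Pre_.
def pvResultOf (d : List (String × String)) : String :=
  ((PySem.Dict.mk d).get? "result").getD ""

def determine_final_result_py (dimension_results : List (String × List (String × String))) : String :=
  let results := dimension_results.map (fun kv => pvResultOf kv.2)
  if results.contains "fail" then "fail"
  else
    let pass_count := results.countP (· == "pass")
    if pass_count ≥ 2 then "pass" else "pass_with_concerns"

-- ===== PORT B =====
-- summarize(vals): recursively split in halves, merge (has_fail, pass_count)
def pvSummarize : List (String × List (String × String)) → Bool × Nat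
  | [] => (false, 0)
  | [kv] =>
    let r := pvResultOf kv.2
    (r == "fail", if r == "pass" then 1 else 0)
  | a :: b :: rest =>
    ((pvSummarize ((a :: b :: rest).take ((a :: b :: rest).length / 2))).1 ||
       (pvSummarize ((a :: b :: rest).drop ((a :: b :: rest).length / 2))).1,
     (pvSummarize ((a :: b :: rest).take ((a :: b :: rest).length / 2))).2 +
       (pvSummarize ((a :: b :: rest).drop ((a :: b :: rest).length / 2))).2)
termination_by l => l.length
decreasing_by
  all_goals simp [List.length_take, List.length_drop, List.length_cons]; omega

def determine_final_result_py_alt (dimension_results : List (String × List (String × String))) : String :=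
  let s := pvSummarize dimension_results
  if s.1 then "fail"
  else if s.2 ≥ 2 then "pass" else "pass_with_concerns"

-- ===== PRECONDITION & SPEC =====
-- Pre_ excludes exactly the inputs where some inner dict lacks the key "result": there Python A raises KeyError.
def Pre_determine_final_result_py (dimension_results : List (String × List (String × String))) : Prop :=
  (dimension_results.all (fun kv => kv.2.any (fun p => p.1 == "result"))) = true
instance (dimension_results : List (String × List (String × String))) : Decidable (Pre_determine_final_result_py dimension_results) := by unfold Pre_determine_final_result_py; infer_instance
def pvWitness_determine_final_result_py : (List (String × List (String × String))) := [("roe", [("result", "pass")]), ("debt", [("result", "fail")])]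

def Spec_determine_final_result_py (dimension_results : List (String × List (String × String))) (out : String) : Prop := out = determine_final_result_py_alt dimension_results
instance (dimension_results : List (String × List (String × String))) (out : String) : Decidable (Spec_determine_final_result_py dimension_results out) := by unfold Spec_determine_final_result_py; infer_instance

-- ===== CLAIM (what is proved, stated in full; the proofs are below) =====
def Claim_equal_determine_final_result_py : Prop := ∀ (dimension_results : List (String × List (String × String))), Dom_determine_final_result_py dimension_results → Pre_determine_final_result_py dimension_results → Spec_determine_final_result_py dimension_results (determine_final_result_py dimension_results)

-- ===== LEMMAS AND PROOFS =====
-- Characterisation: the divide-and-conquer summary is ("fail" membership, count of "pass") of the results list.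
theorem pvSummarize_eq (l : List (String × List (String × String))) :
    pvSummarize l =
      ((l.map (fun kv => pvResultOf kv.2)).contains "fail",
       (l.map (fun kv => pvResultOf kv.2)).countP (· == "pass")) := by
  induction l using pvSummarize.induct with
  | case1 => simp [pvSummarize]
  | case2 kv =>
    have hb : (pvResultOf kv.2 == "fail") = ("fail" == pvResultOf kv.2) := by
      by_cases h : pvResultOf kv.2 = "fail"
      · simp [h]
      · simp [h, Ne.symm h]
    simp [pvSummarize, hb]
    by_cases h : "fail" = pvResultOf kv.2 <;> simp [h]
  | case3 a b rest ih1 ih2 =>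
    rw [pvSummarize]
    have hsp : (a :: b :: rest).take ((a :: b :: rest).length / 2) ++
        (a :: b :: rest).drop ((a :: b :: rest).length / 2) = a :: b :: rest :=
      List.take_append_drop _ _
    have := congrArg (fun t => ((t.map (fun kv => pvResultOf kv.2)).contains "fail",
      (t.map (fun kv => pvResultOf kv.2)).countP (· == "pass"))) hsp
    simp only [List.map_append, List.contains_append, List.countP_append, Prod.mk.injEq] at this
    simp only [ih1, ih2, Prod.mk.injEq]
    exact ⟨this.1, this.2⟩

-- ===== VERDICT (by name: the statement is the Claim_ definition above) =====
theorem determine_final_result_py_spec : Claim_equal_determine_final_result_py := by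
  intro dr _ _
  unfold Spec_determine_final_result_py determine_final_result_py determine_final_result_py_alt
  rw [pvSummarize_eq]
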